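-- pv_equiv track=rewrite | github.com/Jaeyeop-Jung/CodingTest | 백준/그리디/17609.py | isAva
-- ===== SOURCE A (Python) =====
-- def isAva(arr, left, right):
--     while left < right:
--         if arr[left] == arr[right]:
--             left += 1
--             right -= 1
--         else:
--             return False
--     return True
-- ===== SOURCE B (Python) =====
-- def isAva(arr, left, right):
--     if left >= right:
--         return True
--     sub = [arr[i] for i in range(left, right + 1)]
--     return sub == sub[::-1]
-- ===== Notes on version B (the rewrite author's own statement) =====
-- stated objective: simpler
-- what changed: Replaces the two-pointer inward walk with early return by materialising the indexed window once and comparing it to its reversal in a single expression.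
import Mathlib
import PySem

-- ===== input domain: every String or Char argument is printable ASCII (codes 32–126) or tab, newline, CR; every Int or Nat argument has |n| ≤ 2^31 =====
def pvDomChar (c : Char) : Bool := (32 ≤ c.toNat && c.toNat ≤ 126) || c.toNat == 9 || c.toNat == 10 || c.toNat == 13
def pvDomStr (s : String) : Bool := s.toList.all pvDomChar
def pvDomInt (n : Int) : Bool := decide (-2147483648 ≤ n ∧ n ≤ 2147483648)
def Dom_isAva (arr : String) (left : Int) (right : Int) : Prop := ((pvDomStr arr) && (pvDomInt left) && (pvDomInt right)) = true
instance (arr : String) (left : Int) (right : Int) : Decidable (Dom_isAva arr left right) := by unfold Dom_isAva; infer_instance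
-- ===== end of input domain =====

-- B replaces A's early-exit two-pointer walk by building the indexed window once and
-- comparing it with its reversal (objective: simpler, one expression instead of a loop).

-- ===== PORT A =====
-- the while-loop of A as structural recursion on the gap right - left
def isAvaLoop (arr : String) (left : Int) (right : Int) : Bool :=
  if _h : left < right then
    match PySem.Str.pyGet? arr left, PySem.Str.pyGet? arr right with
    | some a, some b =>
        if a == b then isAvaLoop arr (left + 1) (right - 1) else false
    | _, _ => false        -- arr[left] / arr[right] raises IndexError; excluded by Pre_
  else
    true
termination_by (right - left).toNat
decreasing_by omega

def isAva (arr : String) (left : Int) (right : Int) : Bool :=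
  isAvaLoop arr left right

-- ===== PORT B =====
def isAva_alt (arr : String) (left : Int) (right : Int) : Bool :=
  if left ≥ right then true
  else
    let sub := (PySem.List.pyRange left (right + 1) 1).map (fun i => PySem.Str.pyGet? arr i)
    sub == sub.reverse

-- ===== PRECONDITION & SPEC =====
-- Pre_ excludes exactly the inputs where A raises IndexError: left < right with an
-- endpoint outside Python's (negative-index) range of arr.
def Pre_isAva (arr : String) (left : Int) (right : Int) : Prop :=
  left < right → PySem.Raise.InRange arr.toList.length left ∧ PySem.Raise.InRange arr.toList.length right
instance (arr : String) (left : Int) (right : Int) : Decidable (Pre_isAva arr left right) := by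
  unfold Pre_isAva; infer_instance

def pvWitness_isAva : String × Int × Int := ("aba", 0, 2)

def Spec_isAva (arr : String) (left : Int) (right : Int) (out : Bool) : Prop := out = isAva_alt arr left right
instance (arr : String) (left : Int) (right : Int) (out : Bool) : Decidable (Spec_isAva arr left right out) := by unfold Spec_isAva; infer_instance

-- ===== CLAIM (what is proved, stated in full; the proofs are below) =====
def Claim_equal_isAva : Prop := ∀ (arr : String) (left : Int) (right : Int), Dom_isAva arr left right → Pre_isAva arr left right → Spec_isAva arr left right (isAva arr left right)

-- ===== LEMMAS AND PROOFS =====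

-- the window B builds, as a function of the two bounds
def pvSub (arr : String) (l r : Int) : List (Option Char) :=
  (PySem.List.pyRange l (r + 1) 1).map (fun i => PySem.Str.pyGet? arr i)

theorem pvPalStep {α : Type} (a b : α) (xs : List α) :
    (a :: xs ++ [b] = (a :: xs ++ [b]).reverse) ↔ (a = b ∧ xs = xs.reverse) := by
  simp only [List.reverse_cons, List.reverse_append, List.reverse_cons, List.reverse_nil,
    List.nil_append, List.cons_append, List.cons.injEq]
  constructor
  · rintro ⟨rfl, h⟩
    refine ⟨rfl, ?_⟩
    have := List.append_inj_left' h (by simp)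
    exact this
  · rintro ⟨rfl, h⟩
    exact ⟨rfl, by rw [← h]⟩

theorem pvSub_decomp (arr : String) (l r : Int) (h : l < r) :
    pvSub arr l r =
      PySem.Str.pyGet? arr l :: pvSub arr (l + 1) (r - 1) ++ [PySem.Str.pyGet? arr r] := by
  unfold pvSub
  rw [PySem.List.pyRange_one_cons (by omega), PySem.List.pyRange_one_succ_right (by omega)]
  simp [sub_add_cancel]

theorem pvLoop_iff (arr : String) :
    ∀ (m : Nat) (l r : Int), (r - l).toNat = m →
    (l < r → PySem.Raise.InRange arr.toList.length l ∧ PySem.Raise.InRange arr.toList.length r) →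
    (isAvaLoop arr l r = true ↔ pvSub arr l r = (pvSub arr l r).reverse) := by
  intro m
  induction m using Nat.strong_induction_on with
  | _ m ih =>
    intro l r hm hpre
    by_cases h : l < r
    · obtain ⟨hl, hr⟩ := hpre h
      obtain ⟨a, ha⟩ : ∃ a, PySem.Str.pyGet? arr l = some a := by
        rcases hg : PySem.Str.pyGet? arr l with _ | a
        · exfalso
          have := (PySem.List.pyGet?_eq_none_iff (xs := arr.toList) (i := l)).mp (by simpa using hg)
          exact this hl
        · exact ⟨a, rfl⟩
      obtain ⟨b, hb⟩ : ∃ b, PySem.Str.pyGet? arr r = some b := by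
        rcases hg : PySem.Str.pyGet? arr r with _ | b
        · exfalso
          have := (PySem.List.pyGet?_eq_none_iff (xs := arr.toList) (i := r)).mp (by simpa using hg)
          exact this hr
        · exact ⟨b, rfl⟩
      rw [pvSub_decomp arr l r h, ha, hb, pvPalStep]
      rw [isAvaLoop]
      simp only [dif_pos h, ha, hb]
      by_cases hab : a = b
      · subst hab
        simp only [BEq.rfl, if_true]
        have hrec := ih ((r - 1) - (l + 1)).toNat (by omega) (l + 1) (r - 1) rfl
          (fun h2 => ⟨⟨by have := hl.1; omega, by have := hr.2; omega⟩,
                      ⟨by have := hl.1; omega, by have := hr.2; omega⟩⟩)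
        rw [hrec]
        tauto
      · simp only [beq_eq_false_iff_ne.mpr hab, Option.some.injEq]
        constructor
        · intro hcontra; exact absurd hcontra (by simp)
        · rintro ⟨hcontra, -⟩; exact absurd hcontra hab
    · rw [isAvaLoop]
      simp only [dif_neg h]
      constructor
      · intro _
        by_cases he : l = r
        · subst he
          unfold pvSub
          rw [PySem.List.pyRange_one_cons (by omega), PySem.List.pyRange_one_eq_nil (by omega)]
          simp
        · unfold pvSub
          rw [PySem.List.pyRange_one_eq_nil (by omega)]
          simp
      · intro _; trivial

-- ===== VERDICT (by name: the statement is the Claim_ definition above) =====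
theorem isAva_spec : Claim_equal_isAva := by
  intro arr l r _ hpre
  unfold Spec_isAva isAva isAva_alt
  by_cases h : l ≥ r
  · rw [isAvaLoop]
    simp [h, not_lt.mpr h]
  · simp only [if_neg h]
    have := pvLoop_iff arr (r - l).toNat l r rfl hpre
    rw [Bool.eq_iff_iff, this]
    show _ ↔ (pvSub arr l r == (pvSub arr l r).reverse) = true
    simp
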